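-- pv_equiv track=rewrite | github.com/carmelyr/nn_standard_architecture_hps | pareto_analysis.py | _calculate_cnn_size
-- ===== SOURCE A (Python) =====
-- def _calculate_cnn_size(config, input_shape, num_classes):
--     num_filters = config["num_filters"]
--     kernel_size = config["kernel_size"]
--     num_layers = config.get("num_layers", 1)
--
--     seq_len, num_features = input_shape[0], input_shape[-1]
--
--     total_params = 0
--     in_channels = num_features
--     current_seq_len = seq_len
--
--     # Convolutional layers
--     for _ in range(num_layers):
--         # Conv1d: (in_channels * kernel_size * out_channels) + bias
--         total_params += in_channels * kernel_size * num_filters + num_filters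
--         # BatchNorm1d: weight + bias
--         total_params += num_filters + num_filters
--
--         # updates for next layer
--         in_channels = num_filters
--
--         # accounts for pooling reduction
--         if current_seq_len > 4:
--             pooling_size = config.get("pooling_size", 2)
--             current_seq_len = current_seq_len // pooling_size
--
--     # final classifier
--     flatten_size = current_seq_len * num_filters
--     total_params += flatten_size * num_classes + num_classes
--
--     return total_params
-- ===== SOURCE B (Python) =====
-- def _calculate_cnn_size(config, input_shape, num_classes):
--     num_filters = config["num_filters"]
--     kernel_size = config["kernel_size"]
--     num_layers = config.get("num_layers", 1)
--     pooling_size = config.get("pooling_size", 2)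
--     seq_len, num_features = input_shape[0], input_shape[-1]
--
--     # closed-form parameter count instead of accumulating per layer
--     if num_layers >= 1:
--         total = (num_features * kernel_size * num_filters + num_filters
--                  + (num_layers - 1) * (num_filters * kernel_size * num_filters + num_filters)
--                  + 2 * num_filters * num_layers)
--     else:
--         total = 0
--
--     # pooled sequence length: stop as soon as it can no longer change
--     cur = seq_len
--     layers = num_layers
--     while layers >= 1 and cur > 4:
--         nxt = cur // pooling_size
--         if nxt == cur:
--             break
--         cur = nxt
--         layers -= 1
--
--     return total + cur * num_filters * num_classes + num_classes
-- ===== Notes on version B (the rewrite author's own statement) =====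
-- stated objective: faster
-- what changed: Replaces the per-layer accumulation loop with a closed-form expression for the parameter count, keeping only a short pooling loop over the sequence length that exits early once the length stops changing.
import Mathlib
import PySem

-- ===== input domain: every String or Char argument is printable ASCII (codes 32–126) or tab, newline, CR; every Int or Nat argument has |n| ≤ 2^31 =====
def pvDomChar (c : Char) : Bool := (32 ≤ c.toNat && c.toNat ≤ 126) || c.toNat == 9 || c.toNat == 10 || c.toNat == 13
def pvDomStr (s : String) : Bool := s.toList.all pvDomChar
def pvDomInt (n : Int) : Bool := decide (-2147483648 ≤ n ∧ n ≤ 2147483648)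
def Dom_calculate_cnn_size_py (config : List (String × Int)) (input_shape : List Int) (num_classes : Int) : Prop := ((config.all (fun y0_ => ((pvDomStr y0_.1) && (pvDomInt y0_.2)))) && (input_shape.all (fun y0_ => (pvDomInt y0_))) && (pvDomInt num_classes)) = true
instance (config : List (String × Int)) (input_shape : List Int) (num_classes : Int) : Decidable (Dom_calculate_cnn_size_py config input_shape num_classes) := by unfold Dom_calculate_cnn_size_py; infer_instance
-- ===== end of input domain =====

-- B replaces A's per-layer accumulation loop by a closed-form parameter count plus a short
-- early-exiting pooling loop over the sequence length (return value only; no side effects).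

-- ===== PORT A =====
-- loop body of A: (total, in_channels, current_seq_len) ↦ next state
def pvStepA (d : PySem.Dict String Int) (num_filters kernel_size : Int) (s : Int × Int × Int) : Int × Int × Int :=
  (s.1 + s.2.1 * kernel_size * num_filters + num_filters + (num_filters + num_filters),
   num_filters,
   if s.2.2 > 4 then PySem.Int.floordiv s.2.2 (d.getD "pooling_size" 2) else s.2.2)

def calculate_cnn_size_py (config : List (String × Int)) (input_shape : List Int) (num_classes : Int) : Int :=
  let d := PySem.Dict.mk config
  let num_filters := (d.get? "num_filters").getD 0      -- KeyError outside Pre_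
  let kernel_size := (d.get? "kernel_size").getD 0      -- KeyError outside Pre_
  let num_layers := d.getD "num_layers" 1
  let seq_len := (PySem.List.pyGet? input_shape 0).getD 0       -- IndexError outside Pre_
  let num_features := (PySem.List.pyGet? input_shape (-1)).getD 0
  let st := (PySem.List.pyRange 0 num_layers 1).foldl
    (fun s _ => pvStepA d num_filters kernel_size s) (0, num_features, seq_len)
  st.1 + st.2.2 * num_filters * num_classes + num_classes

-- ===== PORT B =====
-- B's while loop: divide cur by p at most n times, stopping at cur ≤ 4 or when cur stops changing
def pvShrink (p : Int) : Int → Nat → Int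
  | cur, 0 => cur
  | cur, n+1 =>
    if cur > 4 then
      let nxt := PySem.Int.floordiv cur p
      if nxt = cur then cur else pvShrink p nxt n
    else cur

def calculate_cnn_size_py_alt (config : List (String × Int)) (input_shape : List Int) (num_classes : Int) : Int :=
  let d := PySem.Dict.mk config
  let num_filters := (d.get? "num_filters").getD 0
  let kernel_size := (d.get? "kernel_size").getD 0
  let num_layers := d.getD "num_layers" 1
  let pooling_size := d.getD "pooling_size" 2
  let seq_len := (PySem.List.pyGet? input_shape 0).getD 0
  let num_features := (PySem.List.pyGet? input_shape (-1)).getD 0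
  let total :=
    if num_layers ≥ 1 then
      num_features * kernel_size * num_filters + num_filters
        + (num_layers - 1) * (num_filters * kernel_size * num_filters + num_filters)
        + 2 * num_filters * num_layers
    else 0
  let cur := pvShrink pooling_size seq_len num_layers.toNat
  total + cur * num_filters * num_classes + num_classes

-- ===== PRECONDITION & SPEC =====
-- Pre_ excludes exactly the inputs where Python A raises: missing "num_filters"/"kernel_size"
-- (KeyError), empty input_shape (IndexError), and pooling_size 0 reached by the loop (ZeroDivisionError).
def Pre_calculate_cnn_size_py (config : List (String × Int)) (input_shape : List Int) (num_classes : Int) : Prop :=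
  (PySem.Dict.mk config).contains "num_filters" = true ∧
  (PySem.Dict.mk config).contains "kernel_size" = true ∧
  input_shape ≠ [] ∧
  ((PySem.Dict.mk config).getD "num_layers" 1 ≤ 0 ∨
   (PySem.List.pyGet? input_shape 0).getD 0 ≤ 4 ∨
   (PySem.Dict.mk config).getD "pooling_size" 2 ≠ 0)
instance (config : List (String × Int)) (input_shape : List Int) (num_classes : Int) : Decidable (Pre_calculate_cnn_size_py config input_shape num_classes) := by unfold Pre_calculate_cnn_size_py; infer_instance

def pvWitness_calculate_cnn_size_py : (List (String × Int)) × List Int × Int :=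
  ([("num_filters", 3), ("kernel_size", 2)], [8, 5], 2)

def Spec_calculate_cnn_size_py (config : List (String × Int)) (input_shape : List Int) (num_classes : Int) (out : Int) : Prop := out = calculate_cnn_size_py_alt config input_shape num_classes
instance (config : List (String × Int)) (input_shape : List Int) (num_classes : Int) (out : Int) : Decidable (Spec_calculate_cnn_size_py config input_shape num_classes out) := by unfold Spec_calculate_cnn_size_py; infer_instance

-- ===== CLAIM (what is proved, stated in full; the proofs are below) =====
def Claim_equal_calculate_cnn_size_py : Prop := ∀ (config : List (String × Int)) (input_shape : List Int) (num_classes : Int), Dom_calculate_cnn_size_py config input_shape num_classes → Pre_calculate_cnn_size_py config input_shape num_classes → Spec_calculate_cnn_size_py config input_shape num_classes (calculate_cnn_size_py config input_shape num_classes)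

-- ===== LEMMAS AND PROOFS =====

-- a fold that ignores the list elements is an iterate of its step
theorem foldl_const_iterate {α β : Type} (f : α → α) (l : List β) (init : α) :
    l.foldl (fun s _ => f s) init = f^[l.length] init := by
  induction l generalizing init with
  | nil => rfl
  | cons a l ih =>
      simp only [List.foldl_cons, List.length_cons, ih, Function.iterate_succ_apply]

-- the seq-len update of A's loop
def pvG (p : Int) (c : Int) : Int := if c > 4 then PySem.Int.floordiv c p else c

theorem pvG_iterate_eq_shrink (p : Int) : ∀ (n : Nat) (c : Int), (pvG p)^[n] c = pvShrink p c n := by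
  intro n
  induction n with
  | zero => intro c; rfl
  | succ n ih =>
      intro c
      by_cases h4 : c > 4
      · by_cases hfix : PySem.Int.floordiv c p = c
        · have hg : pvG p c = c := by simp [pvG, h4, hfix]
          rw [Function.iterate_fixed hg]
          simp [pvShrink, h4, hfix]
        · rw [Function.iterate_succ_apply]
          have hg : pvG p c = PySem.Int.floordiv c p := by simp [pvG, h4]
          rw [hg, ih]
          simp [pvShrink, h4, hfix]
      · have hg : pvG p c = c := by simp [pvG, h4]
        rw [Function.iterate_fixed hg]
        simp [pvShrink, h4]

-- iterating A's step with in_channels already = num_filters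
theorem pvStepA_iterate (d : PySem.Dict String Int) (F K : Int) :
    ∀ (n : Nat) (t c : Int),
      (pvStepA d F K)^[n] (t, F, c)
        = (t + (n : Int) * (F * K * F + F + (F + F)), F, (pvG (d.getD "pooling_size" 2))^[n] c) := by
  intro n
  induction n with
  | zero => intro t c; simp
  | succ n ih =>
      intro t c
      rw [Function.iterate_succ_apply, Function.iterate_succ_apply]
      show (pvStepA d F K)^[n] (t + F * K * F + F + (F + F), F, pvG (d.getD "pooling_size" 2) c) = _
      rw [ih]
      push_cast
      ring_nf

-- ===== VERDICT (by name: the statement is the Claim_ definition above) =====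
theorem calculate_cnn_size_py_spec : Claim_equal_calculate_cnn_size_py := by
  intro config input_shape num_classes _ _
  unfold Spec_calculate_cnn_size_py calculate_cnn_size_py calculate_cnn_size_py_alt
  dsimp only
  set d := PySem.Dict.mk config with hd
  set F := (d.get? "num_filters").getD 0 with hF
  set K := (d.get? "kernel_size").getD 0 with hK
  set L := d.getD "num_layers" 1 with hL
  set p := d.getD "pooling_size" 2 with hp
  set s0 := (PySem.List.pyGet? input_shape 0).getD 0 with hs0
  set NF := (PySem.List.pyGet? input_shape (-1)).getD 0 with hNF
  have hlen : (PySem.List.pyRange 0 L 1).length = L.toNat := by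
    rw [PySem.List.length_pyRange_one]; omega
  rw [foldl_const_iterate (pvStepA d F K), hlen]
  rcases Nat.eq_zero_or_pos L.toNat with h0 | hpos
  · have hL0 : ¬ L ≥ 1 := by omega
    rw [h0]
    simp [hL0, pvShrink]
  · obtain ⟨m, hm⟩ : ∃ m, L.toNat = m + 1 := ⟨L.toNat - 1, by omega⟩
    have hL1 : L ≥ 1 := by omega
    have hLm : L = (m : Int) + 1 := by omega
    rw [hm, Function.iterate_succ_apply]
    have hstep : pvStepA d F K (0, NF, s0) = (0 + NF * K * F + F + (F + F), F, pvG p s0) := by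
      simp [pvStepA, pvG, hp]
    rw [hstep, pvStepA_iterate, pvG_iterate_eq_shrink]
    have hshr : pvShrink p (pvG p s0) m = pvShrink p s0 (m + 1) := by
      rw [← pvG_iterate_eq_shrink, ← pvG_iterate_eq_shrink, ← Function.iterate_succ_apply]
    rw [hshr]
    rw [hLm, if_pos (by omega : (m : Int) + 1 ≥ 1)]
    push_cast
    ring
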